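-- pv_equiv track=rewrite | github.com/Planet-Moon/SMA_devices | TypeConversion.py | list_to_number
-- ===== SOURCE A (Python) =====
-- def list_to_number(number, length=2, signed=False): #little endian
--     """Convert list of integers to a single integer
--
--     Args:
--         number (list): List to be converted
--         length (int, optional): Wordlength of the list. Defaults to 2.
--         signed (bool, optional): True if data should be signed. Defaults to False.
--
--     Returns:
--         int: Converted list to a single integer
--     """
--     unsigned_number = 0
--     number_length = len(number)-1
--     for i in range(number_length, -1, -1):
--         factor = pow(2,16*(number_length-i))
--         unsigned_number += number[i] * factor
--         pass
--     if not signed: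
--         return unsigned_number
--     else:
--         mask = 1 << 15 + number_length * 16
--         if unsigned_number & mask:
--             # negative
--             signed_Number = (unsigned_number & ~mask) - mask
--         else:
--             # positive
--             signed_Number = unsigned_number & ~mask
--         return signed_Number
-- ===== SOURCE B (Python) =====
-- def list_to_number(number, length=2, signed=False):
--     """Big-endian-accumulate (number[0] most significant) via shifts; the signed
--     wrap is done arithmetically from the top bit, no bitwise masking."""
--     value = 0
--     for word in number:
--         value = (value << 16) + word
--     if not signed:
--         return value
--     half = 1 << (15 + (len(number) - 1) * 16)
--     return value - 2 * half * ((value // half) % 2)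
-- ===== Notes on version B (the rewrite author's own statement) =====
-- stated objective: faster
-- what changed: The reversed index loop with per-step pow(2,16*k) weights becomes a forward Horner shift-accumulate pass, and the bitwise sign branch (mask AND, NOT-mask, two's-complement subtract) is replaced by a purely arithmetic wrap: value - 2*half*((value // half) % 2) where half is the top-bit weight.
import Mathlib
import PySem

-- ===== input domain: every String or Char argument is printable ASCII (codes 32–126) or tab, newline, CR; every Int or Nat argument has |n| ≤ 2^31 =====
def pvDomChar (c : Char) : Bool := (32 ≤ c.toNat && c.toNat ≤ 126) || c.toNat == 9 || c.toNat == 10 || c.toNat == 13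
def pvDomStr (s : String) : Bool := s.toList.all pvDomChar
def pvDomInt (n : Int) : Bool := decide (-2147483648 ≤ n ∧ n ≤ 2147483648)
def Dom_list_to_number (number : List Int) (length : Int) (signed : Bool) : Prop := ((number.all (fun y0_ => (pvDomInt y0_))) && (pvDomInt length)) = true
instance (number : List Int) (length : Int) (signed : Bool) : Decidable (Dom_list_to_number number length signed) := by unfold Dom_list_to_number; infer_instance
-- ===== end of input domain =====

-- B replaces A's reversed pow-weighted index loop by a forward shift-accumulate pass and
-- replaces the bitwise signed-mask branch by the arithmetic wrap value - 2*half*((value//half)%2).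


-- ===== PORT A =====
def list_to_number (number : List Int) (length : Int) (signed : Bool) : Int :=
  let number_length : Int := (number.length : Int) - 1
  let unsigned_number : Int :=
    (PySem.List.pyRange number_length (-1) (-1)).foldl
      (fun acc i => acc + PySem.List.pyGetD number i 0 * 2 ^ (16 * (number_length - i)).toNat) 0
  if !signed then
    unsigned_number
  else
    let mask : Int := (1:Int) <<< (15 + number_length * 16).toNat
    if PySem.Int.band unsigned_number mask ≠ 0 then
      PySem.Int.band unsigned_number (Int.not mask) - mask
    else
      PySem.Int.band unsigned_number (Int.not mask)

-- ===== PORT B =====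
def list_to_number_alt (number : List Int) (length : Int) (signed : Bool) : Int :=
  let value : Int := number.foldl (fun (acc : Int) w => (acc <<< (16:Nat)) + w) 0
  if !signed then
    value
  else
    let half : Int := (1:Int) <<< (15 + ((number.length : Int) - 1) * 16).toNat
    value - 2 * half * (PySem.Int.mod (PySem.Int.floordiv value half) 2)

-- ===== PRECONDITION & SPEC =====
-- Pre_ excludes only signed=True with an empty list: there Python's `1 << 15 + (-1)*16` is a
-- negative shift and BOTH A and B raise ValueError.
def Pre_list_to_number (number : List Int) (length : Int) (signed : Bool) : Prop :=
  signed = true → number ≠ []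
instance (number : List Int) (length : Int) (signed : Bool) : Decidable (Pre_list_to_number number length signed) := by unfold Pre_list_to_number; infer_instance
def pvWitness_list_to_number : List Int × Int × Bool := ([1, 2], 2, true)
def Spec_list_to_number (number : List Int) (length : Int) (signed : Bool) (out : Int) : Prop := out = list_to_number_alt number length signed
instance (number : List Int) (length : Int) (signed : Bool) (out : Int) : Decidable (Spec_list_to_number number length signed out) := by unfold Spec_list_to_number; infer_instance

-- ===== CLAIM (what is proved, stated in full; the proofs are below) =====
def Claim_equal_list_to_number : Prop := ∀ (number : List Int) (length : Int) (signed : Bool), Dom_list_to_number number length signed → Pre_list_to_number number length signed → Spec_list_to_number number length signed (list_to_number number length signed)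

-- ===== LEMMAS AND PROOFS =====

-- B's shift-accumulate function is plain Horner multiplication by 65536.
theorem shiftfun_eq : (fun (acc : Int) w => (acc <<< (16:Nat)) + w) = (fun (acc : Int) w => acc * 65536 + w) := by
  funext a w
  rw [Int.shiftLeft_eq]
  norm_num

-- Horner accumulation agrees with the pow-weighted sum of A's reversed loop.
theorem horner_foldl_init (xs : List Int) (a : Int) :
    xs.foldl (fun (acc : Int) w => acc * 65536 + w) a
      = a * 65536 ^ xs.length + xs.foldl (fun (acc : Int) w => acc * 65536 + w) 0 := by
  induction xs generalizing a with
  | nil => simp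
  | cons w rest ih =>
    simp only [List.foldl_cons, List.length_cons]
    rw [ih (a * 65536 + w), ih (0 * 65536 + w)]
    ring

theorem asum'_eq_horner (xs : List Int) :
    (∑ k ∈ Finset.range xs.length, xs.getD (xs.length - 1 - k) 0 * 65536 ^ k)
      = xs.foldl (fun (acc : Int) w => acc * 65536 + w) 0 := by
  induction xs with
  | nil => simp
  | cons w rest ih =>
    simp only [List.length_cons, List.foldl_cons]
    rw [Finset.sum_range_succ, horner_foldl_init, ← ih]
    have hidx : ∀ k ∈ Finset.range rest.length,
        (w :: rest).getD (rest.length + 1 - 1 - k) 0 * 65536 ^ k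
          = rest.getD (rest.length - 1 - k) 0 * 65536 ^ k := by
      intro k hk
      simp only [Finset.mem_range] at hk
      have : rest.length + 1 - 1 - k = (rest.length - 1 - k) + 1 := by omega
      rw [this]; simp
    rw [Finset.sum_congr rfl hidx]
    simp
    ring

theorem foldl_range_add (m : Nat) (f : Nat → Int) :
    (List.range m).foldl (fun a k => a + f k) 0 = ∑ k ∈ Finset.range m, f k := by
  induction m with
  | zero => simp
  | succ m ih => rw [List.range_succ, List.foldl_append, Finset.sum_range_succ, ih]; simp

theorem asum_eq_horner (xs : List Int) :
    (PySem.List.pyRange ((xs.length : Int) - 1) (-1) (-1)).foldl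
        (fun acc i => acc + PySem.List.pyGetD xs i 0 * 2 ^ (16 * ((xs.length : Int) - 1 - i)).toNat) 0
      = xs.foldl (fun (acc : Int) w => acc * 65536 + w) 0 := by
  rw [PySem.List.pyRange_neg_one, List.foldl_map, ← asum'_eq_horner]
  have hlen : (((xs.length : Int) - 1) - (-1)).toNat = xs.length := by omega
  rw [hlen, foldl_range_add]
  refine Finset.sum_congr rfl ?_
  intro k hk
  simp only [Finset.mem_range] at hk
  have h1 : ((xs.length : Int) - 1) - (((xs.length : Int) - 1) - (k : Int)) = (k : Int) := by ring
  rw [h1]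
  have h2 : (16 * (k : Int)).toNat = 16 * k := by omega
  rw [h2, PySem.List.pyGetD_of_nonneg (h := by omega)]
  have h3 : (((xs.length : Int) - 1) - (k : Int)).toNat = xs.length - 1 - k := by omega
  rw [h3, pow_mul]
  norm_num

-- the Python bit (u // 2^p) % 2 of an integer u, via floor division
def pvBit (u : Int) (p : Nat) : Int := PySem.Int.mod (PySem.Int.floordiv u (2 ^ p)) 2

theorem pvBit_natCast (n p : Nat) : pvBit (n : Int) p = ((n.testBit p).toNat : Int) := by
  unfold pvBit
  rw [PySem.Int.floordiv_eq_ediv_of_pos (by positivity),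
      PySem.Int.mod_eq_emod_of_pos (by norm_num),
      show ((2:Int) ^ p) = ((2 ^ p : Nat) : Int) by push_cast; ring,
      Int.ofNat_ediv_ofNat, Nat.testBit_eq_decide_div_mod_eq]
  generalize n / 2 ^ p = q
  rcases Nat.mod_two_eq_zero_or_one q with h | h <;> simp [h] <;> omega

theorem int_neg_div (n : Nat) (p : Nat) :
    (-(n : Int) - 1) / 2 ^ p = -((n / 2 ^ p : Nat) : Int) - 1 := by
  have hb : (0:Int) < 2 ^ p := by positivity
  have hmod : ((n % 2 ^ p : Nat) : Int) < 2 ^ p := by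
    exact_mod_cast Nat.mod_lt _ (by positivity)
  have hdm : ((n / 2 ^ p : Nat) : Int) * 2 ^ p + ((n % 2 ^ p : Nat) : Int) = (n : Int) := by
    exact_mod_cast Nat.div_add_mod' n (2 ^ p)
  exact ((Int.ediv_emod_unique (a := -(n:Int)-1) (b := 2^p)
      (q := -((n / 2 ^ p : Nat) : Int) - 1) (r := 2 ^ p - 1 - ((n % 2 ^ p : Nat) : Int)) hb).mpr
    ⟨by linear_combination -hdm, by omega, by omega⟩).1

theorem pvBit_negSucc (n p : Nat) : pvBit (-(n : Int) - 1) p = 1 - ((n.testBit p).toNat : Int) := by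
  unfold pvBit
  rw [PySem.Int.floordiv_eq_ediv_of_pos (by positivity),
      PySem.Int.mod_eq_emod_of_pos (by norm_num), int_neg_div,
      Nat.testBit_eq_decide_div_mod_eq]
  generalize n / 2 ^ p = q
  rcases Nat.mod_two_eq_zero_or_one q with h | h <;> simp [h] <;> omega

theorem band_two_pow (u : Int) (p : Nat) : PySem.Int.band u (2 ^ p) = 2 ^ p * pvBit u p := by
  have h2p : ((2:Int) ^ p) = ((2 ^ p : Nat) : Int) := by push_cast; ring
  by_cases hu : 0 ≤ u
  · obtain ⟨n, rfl⟩ := Int.eq_ofNat_of_zero_le hu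
    simp only [PySem.Int.band, if_pos hu, if_pos (le_of_lt (by positivity : (0:Int) < 2 ^ p))]
    rw [pvBit_natCast, h2p, Int.toNat_natCast, Int.toNat_natCast, Nat.and_two_pow]
    push_cast; ring
  · have hn : u = -((-u - 1).toNat : Int) - 1 := by omega
    set n := (-u - 1).toNat with hndef
    rw [hn, pvBit_negSucc]
    simp only [PySem.Int.band, if_neg (by omega : ¬ (0:Int) ≤ -(n:Int) - 1),
      if_pos (le_of_lt (by positivity : (0:Int) < 2 ^ p))]
    rw [h2p, Int.toNat_natCast,
        show (-(-(n:Int) - 1) - 1).toNat = n by omega, Nat.two_pow_and]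
    cases hb : n.testBit p <;> simp [hb]

theorem lor_two_pow_arith (p n : Nat) : n ||| 2 ^ p = n + 2 ^ p - (n &&& 2 ^ p) := by
  induction p generalizing n with
  | zero =>
    obtain ⟨b, m, rfl⟩ : ∃ b m, n = Nat.bit b m :=
      ⟨_, _, (Nat.bit_testBit_zero_shiftRight_one n).symm⟩
    rw [show (2 ^ 0 : Nat) = Nat.bit true 0 by simp [Nat.bit_val],
        Nat.lor_bit, Nat.land_bit, Nat.bit_val, Nat.bit_val, Nat.bit_val]
    cases b <;> simp
  | succ p ih =>
    obtain ⟨b, m, rfl⟩ : ∃ b m, n = Nat.bit b m :=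
      ⟨_, _, (Nat.bit_testBit_zero_shiftRight_one n).symm⟩
    rw [show (2 ^ (p + 1) : Nat) = Nat.bit false (2 ^ p) by simp [Nat.bit_val]; ring,
        Nat.lor_bit, Nat.land_bit, Nat.bit_val, Nat.bit_val, Nat.bit_val, ih m]
    have h1 : m &&& 2 ^ p ≤ m := Nat.and_le_left
    cases b <;> simp <;> omega

theorem int_not_eq (x : Int) : Int.not x = -x - 1 := by
  cases x with
  | ofNat n => show Int.negSucc n = _ ; rw [Int.negSucc_eq, Int.ofNat_eq_natCast] ; ring
  | negSucc n => show Int.ofNat n = _ ; rw [Int.negSucc_eq, Int.ofNat_eq_natCast] ; ring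

theorem band_not_two_pow (u : Int) (p : Nat) :
    PySem.Int.band u (Int.not (2 ^ p)) = u - 2 ^ p * pvBit u p := by
  have h2p : ((2:Int) ^ p) = ((2 ^ p : Nat) : Int) := by push_cast; ring
  have hpos : (0:Int) < 2 ^ p := by positivity
  have hnot : Int.not ((2:Int) ^ p) = -(2 ^ p) - 1 := int_not_eq _
  rw [hnot]
  by_cases hu : 0 ≤ u
  · obtain ⟨n, rfl⟩ := Int.eq_ofNat_of_zero_le hu
    simp only [PySem.Int.band, if_pos hu, if_neg (by omega : ¬ (0:Int) ≤ -(2 ^ p) - 1)]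
    have hle : n &&& 2 ^ p ≤ n := Nat.and_le_left
    rw [show (-(-(2:Int) ^ p - 1) - 1) = 2 ^ p by ring, h2p, Int.toNat_natCast,
        Int.toNat_natCast, pvBit_natCast, Nat.and_two_pow]
    rw [Nat.and_two_pow] at hle
    clear hnot hpos
    generalize hP : (2 ^ p : Nat) = P at hle ⊢
    cases hb : n.testBit p <;> simp [hb] at hle ⊢ <;> omega
  · have hn : u = -((-u - 1).toNat : Int) - 1 := by omega
    set n := (-u - 1).toNat with hndef
    rw [hn, pvBit_negSucc]
    simp only [PySem.Int.band, if_neg (by omega : ¬ (0:Int) ≤ -(n:Int) - 1),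
      if_neg (by omega : ¬ (0:Int) ≤ -(2 ^ p) - 1)]
    rw [show (-(-(2:Int) ^ p - 1) - 1) = 2 ^ p by ring, h2p, Int.toNat_natCast,
        show (-(-(n:Int) - 1) - 1).toNat = n by omega]
    have harith := lor_two_pow_arith p n
    have hle : n &&& 2 ^ p ≤ n := Nat.and_le_left
    rw [Nat.and_two_pow] at harith hle
    rw [harith]
    clear hnot hpos
    generalize hP : (2 ^ p : Nat) = P at hle ⊢
    cases hb : n.testBit p <;> simp [hb] at hle ⊢ <;> omega

theorem pvBit_mem (u : Int) (p : Nat) : pvBit u p = 0 ∨ pvBit u p = 1 := by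
  have h1 := PySem.Int.mod_nonneg (a := PySem.Int.floordiv u (2 ^ p)) (b := 2) (by norm_num)
  have h2 := PySem.Int.mod_lt (a := PySem.Int.floordiv u (2 ^ p)) (b := 2) (by norm_num)
  unfold pvBit; omega

-- ===== VERDICT (by name: the statement is the Claim_ definition above) =====
theorem list_to_number_spec : Claim_equal_list_to_number := by
  intro number length signed _ hpre
  unfold Spec_list_to_number list_to_number list_to_number_alt
  simp only [shiftfun_eq]
  rw [asum_eq_horner]
  cases signed with
  | false => simp
  | true =>
    have hne : number ≠ [] := hpre rfl
    have hlen : 1 ≤ number.length := by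
      cases number with
      | nil => exact absurd rfl hne
      | cons a t => simp
    simp only [Bool.not_true, Bool.false_eq_true, if_false]
    set u : Int := number.foldl (fun (acc : Int) w => acc * 65536 + w) 0 with hu
    have hp : (15 + ((number.length : Int) - 1) * 16).toNat = 15 + (number.length - 1) * 16 := by
      omega
    rw [hp]
    set p : Nat := 15 + (number.length - 1) * 16 with hpdef
    have hshift : (1 : Int) <<< p = 2 ^ p := by
      rw [Int.shiftLeft_eq]; ring
    rw [hshift, band_two_pow, band_not_two_pow,
      show PySem.Int.mod (PySem.Int.floordiv u (2 ^ p)) 2 = pvBit u p from rfl]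
    rcases pvBit_mem u p with h | h <;> rw [h] <;> simp <;> ring
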